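-- pv_equiv track=rewrite | github.com/kobedawes/SSW215 | Hw9/even_ind.py | findOver5
-- ===== SOURCE A (Python) =====
-- def count(word, list, counter):
--     for item in list:
--         box = item.split()
--         for string in box:
--             if string == word:
--                 counter += 1
--     return counter
--
-- def findOver5(stack):
--     output = []
--     for item in stack:
--         list = item.split()
--         for string in list:
--             if len(string) > 5:
--                 output += [(string, count(string, stack, 0))]
--     return output
-- ===== SOURCE B (Python) =====
-- def findOver5(stack):
--     long_words = [w for item in stack for w in item.split() if len(w) > 5]
--     counts = {}
--     for w in long_words:
--         counts[w] = counts.get(w, 0) + 1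
--     return [(w, counts[w]) for w in long_words]
-- ===== Notes on version B (the rewrite author's own statement) =====
-- stated objective: faster
-- what changed: B flattens all long-word occurrences into one list, builds a frequency table over it in a single pass, and emits (word, count) pairs from the table, replacing A's per-occurrence rescan of the whole stack (count()) with a one-pass index.
import Mathlib
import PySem

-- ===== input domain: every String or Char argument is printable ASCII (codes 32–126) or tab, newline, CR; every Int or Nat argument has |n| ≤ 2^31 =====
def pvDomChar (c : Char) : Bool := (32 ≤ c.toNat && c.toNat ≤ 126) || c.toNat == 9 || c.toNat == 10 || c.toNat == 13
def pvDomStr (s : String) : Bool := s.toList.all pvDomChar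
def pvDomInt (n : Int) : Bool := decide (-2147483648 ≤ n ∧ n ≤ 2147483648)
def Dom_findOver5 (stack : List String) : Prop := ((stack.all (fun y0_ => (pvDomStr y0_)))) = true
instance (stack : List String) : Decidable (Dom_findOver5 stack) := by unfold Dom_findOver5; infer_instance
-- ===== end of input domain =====

-- B builds one flat list of long-word occurrences and a frequency table over it instead of rescanning the whole stack per occurrence (faster; return value only).


-- ===== PORT A =====
-- A's helper count(word, list, counter)
def pyCount (word : String) (lst : List String) (counter : Int) : Int :=
  lst.foldl (fun counter item =>
    (PySem.Str.split₀ item).foldl (fun counter s =>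
      if s == word then counter + 1 else counter) counter) counter

def findOver5 (stack : List String) : List (String × Int) :=
  stack.foldl (fun output item =>
    (PySem.Str.split₀ item).foldl (fun output s =>
      if 5 < PySem.Str.len s then output ++ [(s, pyCount s stack 0)] else output) output) []

-- ===== PORT B =====
def findOver5_alt (stack : List String) : List (String × Int) :=
  let longWords := stack.flatMap (fun item =>
    (PySem.Str.split₀ item).filter (fun w => 5 < PySem.Str.len w))
  let counts := longWords.foldl (fun d w => d.insert w (d.getD w 0 + 1))
    (PySem.Dict.empty : PySem.Dict String Int)
  longWords.map (fun w => (w, counts.getD w 0))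

-- ===== PRECONDITION & SPEC =====
def Spec_findOver5 (stack : List String) (out : List (String × Int)) : Prop := out = findOver5_alt stack
instance (stack : List String) (out : List (String × Int)) : Decidable (Spec_findOver5 stack out) := by unfold Spec_findOver5; infer_instance

-- ===== CLAIM (what is proved, stated in full; the proofs are below) =====
def Claim_equal_findOver5 : Prop := ∀ (stack : List String), Dom_findOver5 stack → Spec_findOver5 stack (findOver5 stack)

-- ===== LEMMAS AND PROOFS =====

-- all tokens in the stack, in order
def pvTokens (stack : List String) : List String := stack.flatMap PySem.Str.split₀

theorem pyCount_eq_count (w : String) (lst : List String) (c : Int) :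
    pyCount w lst c = c + ((pvTokens lst).count w : Int) := by
  induction lst generalizing c with
  | nil => simp [pyCount, pvTokens]
  | cons a t ih =>
    simp only [pyCount, List.foldl_cons] at *
    rw [ih, PySem.List.foldl_if_add_one]
    simp [pvTokens, List.count]
    ring

-- Prop-test form of PySem.List.foldl_append_if (the library lemma takes a Bool test)
theorem foldl_append_ite {α β : Type} (p : α → Prop) [DecidablePred p] (f : α → β)
    (l : List α) (acc : List β) :
    l.foldl (fun acc x => if p x then acc ++ [f x] else acc) acc
      = acc ++ (l.filter (fun x => decide (p x))).map f := by
  induction l generalizing acc with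
  | nil => simp
  | cons a t ih =>
    by_cases h : p a <;> simp [h, ih]

theorem count_tokens_of_long (stack : List String) (w : String)
    (h : (fun x => decide (5 < PySem.Str.len x)) w = true) :
    ((pvTokens stack).count w : Int) =
      ((stack.flatMap (fun item => (PySem.Str.split₀ item).filter (fun x => 5 < PySem.Str.len x))).count w : Int) := by
  rw [← List.filter_flatMap,
    List.count_filter (p := fun x => decide (5 < PySem.Str.len x)) h]
  rfl

theorem findOver5_spec' (stack : List String) : findOver5 stack = findOver5_alt stack := by
  unfold findOver5 findOver5_alt
  simp only [PySem.Dict.foldl_insert_getD_add_one_eq_counter]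
  simp only [foldl_append_ite (fun s => 5 < PySem.Str.len s) (fun s => (s, pyCount s stack 0)),
    PySem.List.foldl_append_eq_flatMap, List.nil_append]
  rw [← List.map_flatMap]
  apply List.map_congr_left
  intro w hw
  rcases List.mem_flatMap.mp hw with ⟨it, _, hwf⟩
  have hl := List.of_mem_filter hwf
  rw [PySem.Dict.getD_counter, pyCount_eq_count, count_tokens_of_long stack w hl]
  simp


-- ===== VERDICT (by name: the statement is the Claim_ definition above) =====
theorem findOver5_spec : Claim_equal_findOver5 := by
  intro stack _
  exact findOver5_spec' stack
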